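-- pv_equiv track=rewrite | github.com/chloeeegao/SNA-project | obfuscation/obfuscaion_optimize.py | random_edge_list_generate
-- ===== SOURCE A (Python) =====
-- def random_edge_list_generate(list1, list2, E, E_c):
--     for i in range(len(list1)//3):
--         item1 = list1[i]
--         for j in range(len(list2)//3):
--             item2 = list2[j]
--             if item1 != item2:
--                 edge = (min(item1, item2), max(item1, item2))
--                 if edge not in E:
--                     E_c.add(edge)
--                 else:
--                     try:
--                         E_c.remove(edge)
--                     except Exception:
--                         pass
--
--     return E, E_c
-- ===== SOURCE B (Python) =====
-- def random_edge_list_generate(list1, list2, E, E_c):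
--     # Two staged passes instead of A's per-pair toggling:
--     #  - removal: one scan over E_c with a candidacy predicate (no pair enumeration),
--     #  - addition: normalized pairs of the DEDUPLICATED prefixes that are absent from E.
--     # Mutates E_c in place (like A) and returns it; E is only read.
--     p1 = list(dict.fromkeys(list1[:len(list1) // 3]))
--     p2 = list(dict.fromkeys(list2[:len(list2) // 3]))
--     s1, s2 = set(p1), set(p2)
--     E_c -= {(u, v) for (u, v) in E_c
--             if u < v and (u, v) in E
--             and ((u in s1 and v in s2) or (u in s2 and v in s1))}
--     E_c |= {(min(a, b), max(a, b)) for a in p1 for b in p2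
--             if a != b and (min(a, b), max(a, b)) not in E}
--     return E, E_c
-- ===== Notes on version B (the rewrite author's own statement) =====
-- stated objective: alternative
-- what changed: A's nested per-pair loop that toggles each candidate edge in E_c is replaced by two staged passes: removals become one scan over E_c with a candidacy predicate (endpoints split across the prefix element sets, no pair enumeration), and additions are generated once from the deduplicated prefixes filtered against E; valid because E is fixed so each edge's fate is determined by E alone and is idempotent.
import Mathlib
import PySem

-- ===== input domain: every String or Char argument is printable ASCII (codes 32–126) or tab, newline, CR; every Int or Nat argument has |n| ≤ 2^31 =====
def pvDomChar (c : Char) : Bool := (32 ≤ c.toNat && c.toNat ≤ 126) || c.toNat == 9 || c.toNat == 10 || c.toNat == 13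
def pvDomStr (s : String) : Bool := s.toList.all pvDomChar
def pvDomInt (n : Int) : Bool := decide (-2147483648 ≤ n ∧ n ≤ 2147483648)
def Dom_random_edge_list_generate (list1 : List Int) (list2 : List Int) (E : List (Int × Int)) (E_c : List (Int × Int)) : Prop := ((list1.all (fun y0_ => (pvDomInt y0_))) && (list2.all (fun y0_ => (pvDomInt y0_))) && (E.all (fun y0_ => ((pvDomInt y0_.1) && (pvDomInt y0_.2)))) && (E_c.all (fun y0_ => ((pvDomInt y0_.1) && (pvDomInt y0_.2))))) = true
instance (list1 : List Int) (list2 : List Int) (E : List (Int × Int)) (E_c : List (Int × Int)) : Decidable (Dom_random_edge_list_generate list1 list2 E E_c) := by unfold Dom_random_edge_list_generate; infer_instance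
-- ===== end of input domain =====

-- B replaces A's nested per-pair toggle loop by two staged passes: one scan over E_c with a
-- candidacy predicate for the removals, and one generation of normalized pairs of the
-- DEDUPLICATED prefixes filtered against E for the additions (alternative decomposition).
-- Both A and B mutate the Python set E_c in place; the equivalence proved is about the return value.

-- ===== PORT A =====
def random_edge_list_generate (list1 : List Int) (list2 : List Int) (E : List (Int × Int)) (E_c : List (Int × Int)) : (List (Int × Int)) × (List (Int × Int)) :=
  -- E and E_c are Python sets (distinct elements, insertion order)
  let ec := (PySem.List.pyRange 0 (PySem.Int.floordiv (list1.length : Int) 3) 1).foldl (fun ec i =>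
      let item1 := PySem.List.pyGetD list1 i 0
      (PySem.List.pyRange 0 (PySem.Int.floordiv (list2.length : Int) 3) 1).foldl (fun ec j =>
        let item2 := PySem.List.pyGetD list2 j 0
        if item1 ≠ item2 then
          let edge := (min item1 item2, max item1 item2)
          if ¬ (PySem.Set.contains E edge = true) then
            PySem.Set.add ec edge
          else
            -- try: E_c.remove(edge) except: pass
            match PySem.Set.remove? ec edge with
            | some s => s
            | none => ec
        else ec) ec) E_c
  (E, ec)

-- ===== PORT B =====
def random_edge_list_generate_alt (list1 : List Int) (list2 : List Int) (E : List (Int × Int)) (E_c : List (Int × Int)) : (List (Int × Int)) × (List (Int × Int)) :=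
  -- p1 = list(dict.fromkeys(list1[:len(list1)//3])), p2 likewise
  let p1 := PySem.List.dedup (PySem.List.slice list1 none (some (PySem.Int.floordiv (list1.length : Int) 3)))
  let p2 := PySem.List.dedup (PySem.List.slice list2 none (some (PySem.Int.floordiv (list2.length : Int) 3)))
  let s1 : PySem.Set Int := PySem.Set.ofList p1
  let s2 : PySem.Set Int := PySem.Set.ofList p2
  -- E_c -= {(u,v) for (u,v) in E_c if u < v and (u,v) in E and endpoints split across s1/s2}
  let doomed : PySem.Set (Int × Int) := PySem.Set.ofList (E_c.filter (fun e =>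
      decide (e.1 < e.2) && PySem.Set.contains E e &&
      ((PySem.Set.contains s1 e.1 && PySem.Set.contains s2 e.2) ||
       (PySem.Set.contains s2 e.1 && PySem.Set.contains s1 e.2))))
  let ec1 := PySem.Set.diff E_c doomed
  -- E_c |= {(min(a,b), max(a,b)) for a in p1 for b in p2 if a != b and … not in E}
  let adds : PySem.Set (Int × Int) := PySem.Set.ofList (p1.flatMap (fun a =>
      (p2.filter (fun b => decide (a ≠ b) && !(PySem.Set.contains E (min a b, max a b)))).map
        (fun b => (min a b, max a b))))
  let ec2 := PySem.Set.union ec1 adds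
  (E, ec2)

-- ===== PRECONDITION & SPEC =====
def Spec_random_edge_list_generate (list1 : List Int) (list2 : List Int) (E : List (Int × Int)) (E_c : List (Int × Int)) (out : (List (Int × Int)) × (List (Int × Int))) : Prop := out = random_edge_list_generate_alt list1 list2 E E_c
instance (list1 : List Int) (list2 : List Int) (E : List (Int × Int)) (E_c : List (Int × Int)) (out : (List (Int × Int)) × (List (Int × Int))) : Decidable (Spec_random_edge_list_generate list1 list2 E E_c out) := by unfold Spec_random_edge_list_generate; infer_instance

-- ===== CLAIM (what is proved, stated in full; the proofs are below) =====
def Claim_equal_random_edge_list_generate : Prop := ∀ (list1 : List Int) (list2 : List Int) (E : List (Int × Int)) (E_c : List (Int × Int)), Dom_random_edge_list_generate list1 list2 E E_c → Spec_random_edge_list_generate list1 list2 E E_c (random_edge_list_generate list1 list2 E E_c)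

-- ===== LEMMAS AND PROOFS =====

-- one edge-processing step of A, with the membership test on the fixed set E first
def pvGstep (E : List (Int × Int)) (ec : List (Int × Int)) (e : Int × Int) : List (Int × Int) :=
  if E.contains e then PySem.Set.discard ec e else PySem.Set.add ec e

-- the candidate edges, in generation order (with repetitions)
def pvPairs (list1 : List Int) (list2 : List Int) : List (Int × Int) :=
  (list1.take (list1.length / 3)).flatMap (fun a =>
    ((list2.take (list2.length / 3)).filter (fun b => a ≠ b)).map (fun b => (min a b, max a b)))

-- the common normal form of the final E_c
def pvCanon (E : List (Int × Int)) (ps : List (Int × Int)) (ec : List (Int × Int)) : List (Int × Int) :=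
  ec.filter (fun x => !(ps.contains x && E.contains x)) ++
  ((PySem.Set.ofList ps).filter (fun e => !E.contains e)).filter (fun e => !ec.contains e)

lemma pv_bool_ext {a b : Bool} (h : a = true ↔ b = true) : a = b := by
  cases a <;> cases b <;> simp_all

lemma pv_foldl_flatMap {α β σ : Type} (l : List α) (f : α → List β) (g : σ → β → σ) (init : σ) :
    (l.flatMap f).foldl g init = l.foldl (fun acc a => (f a).foldl g acc) init := by
  induction l generalizing init with
  | nil => rfl
  | cons a l ih => simp [List.flatMap_cons, List.foldl_append, ih]

lemma pv_foldl_filter {β σ : Type} (l : List β) (p : β → Bool) (g : σ → β → σ) (init : σ) :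
    (l.filter p).foldl g init = l.foldl (fun acc b => if p b then g acc b else acc) init := by
  induction l generalizing init with
  | nil => rfl
  | cons b l ih => by_cases h : p b <;> simp [h, ih]

-- A's "for i in range(len(xs)//3): x = xs[i]" loop is the fold over the matching prefix
lemma pv_range_take {σ : Type} (xs : List Int) (m : Nat) (hm : m ≤ xs.length)
    (f : σ → Int → σ) (init : σ) :
    (PySem.List.pyRange 0 (m : Int) 1).foldl (fun acc j => f acc (PySem.List.pyGetD xs j 0)) init
      = (xs.take m).foldl f init := by
  have hlen : (xs.take m).length = m := by simp [hm]
  have h1 : (PySem.List.pyRange 0 (m : Int) 1).foldl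
      (fun acc j => f acc (PySem.List.pyGetD xs j 0)) init
      = (PySem.List.pyRange 0 (m : Int) 1).foldl
      (fun acc j => f acc (PySem.List.pyGetD (xs.take m) j 0)) init := by
    apply PySem.List.foldl_congr_mem
    intro acc j hj
    rw [PySem.List.mem_pyRange_one] at hj
    have h0 : (0:Int) ≤ j := hj.1
    have hjm : j.toNat < m := by omega
    have hjx : j < (xs.length : Int) := by omega
    have hjt : j < ((xs.take m).length : Int) := by rw [hlen]; omega
    rw [PySem.List.pyGetD_eq_getElem _ _ h0 hjx, PySem.List.pyGetD_eq_getElem _ _ h0 hjt]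
    simp [List.getElem_take]
  rw [h1]
  have h2 := PySem.List.foldl_pyRange_zero_pyGetD' (xs.take m) 0 f init
  simpa [hlen] using h2

-- the nested "for i … for j …" double loop over prefixes
lemma pv_range_take2 {σ : Type} (xs ys : List Int) (m n : Nat)
    (hm : m ≤ xs.length) (hn : n ≤ ys.length)
    (h : σ → Int → Int → σ) (init : σ) :
    (PySem.List.pyRange 0 (m : Int) 1).foldl (fun acc i =>
        (PySem.List.pyRange 0 (n : Int) 1).foldl (fun acc' j =>
          h acc' (PySem.List.pyGetD xs i 0) (PySem.List.pyGetD ys j 0)) acc) init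
      = (xs.take m).foldl (fun acc a => (ys.take n).foldl (fun acc' b => h acc' a b) acc) init := by
  refine Eq.trans ?_ (pv_range_take xs m hm
    (fun acc a => (ys.take n).foldl (fun acc' b => h acc' a b) acc) init)
  apply PySem.List.foldl_congr_mem
  intro acc i _
  exact pv_range_take ys n hn (fun acc' b => h acc' (PySem.List.pyGetD xs i 0) b) acc

-- A's loop body on one admissible pair is pvGstep (try/except remove = discard)
lemma pv_step_eq (E ec : List (Int × Int)) (e : Int × Int) :
    (if ¬ (PySem.Set.contains E e = true) then PySem.Set.add ec e
     else match PySem.Set.remove? ec e with | some s => s | none => ec)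
      = pvGstep E ec e := by
  unfold pvGstep
  by_cases hEm : e ∈ E
  · have hE : PySem.Set.contains E e = true := by simpa [PySem.Set.contains] using hEm
    have hE' : E.contains e = true := hE
    rw [if_neg (by simp [hEm]), if_pos hE']
    unfold PySem.Set.remove?
    by_cases hm : e ∈ ec
    · rw [if_pos (by simpa [PySem.Set.contains] using hm)]
    · rw [if_neg (by simpa [PySem.Set.contains] using hm)]
      symm
      unfold PySem.Set.discard
      apply List.filter_eq_self.mpr
      intro a ha
      have hane : a ≠ e := fun h => hm (h ▸ ha)
      simp [hane]
  · have hE : E.contains e = false := by simpa using hEm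
    rw [if_pos (by simp [hEm]), if_neg (by simp [hEm])]

-- A's nested fold, channelled through the flat candidate list
lemma pv_pairs_fold (E : List (Int × Int)) (l1 l2 : List Int) (init : List (Int × Int)) :
    l1.foldl (fun ec a => l2.foldl (fun ec b =>
        if a ≠ b then
          (if ¬ (PySem.Set.contains E (min a b, max a b) = true) then
              PySem.Set.add ec (min a b, max a b)
            else match PySem.Set.remove? ec (min a b, max a b) with | some s => s | none => ec)
        else ec) ec) init
      = (l1.flatMap (fun a => (l2.filter (fun b => a ≠ b)).map (fun b => (min a b, max a b)))).foldl
          (pvGstep E) init := by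
  rw [pv_foldl_flatMap]
  apply PySem.List.foldl_congr_mem
  intro ec a _
  rw [List.foldl_map, pv_foldl_filter]
  apply PySem.List.foldl_congr_mem
  intro ec' b _
  by_cases hab : a = b
  · simp [hab]
  · rw [if_pos (show (decide (a ≠ b)) = true by simp [hab])]
    rw [if_pos hab]
    exact pv_step_eq E ec' (min a b, max a b)

lemma pv_A_eq_fold (list1 list2 : List Int) (E E_c : List (Int × Int)) :
    random_edge_list_generate list1 list2 E E_c
      = (E, (pvPairs list1 list2).foldl (pvGstep E) E_c) := by
  have hf1 : PySem.Int.floordiv (list1.length : Int) 3 = ((list1.length / 3 : Nat) : Int) := by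
    exact_mod_cast PySem.Int.floordiv_natCast list1.length 3
  have hf2 : PySem.Int.floordiv (list2.length : Int) 3 = ((list2.length / 3 : Nat) : Int) := by
    exact_mod_cast PySem.Int.floordiv_natCast list2.length 3
  simp only [random_edge_list_generate, hf1, hf2]
  refine congrArg (Prod.mk E) ?_
  refine Eq.trans (pv_range_take2 list1 list2 (list1.length / 3) (list2.length / 3)
    (Nat.div_le_self _ _) (Nat.div_le_self _ _)
    (fun ec a b =>
      if a ≠ b then
        (if ¬ (PySem.Set.contains E (min a b, max a b) = true) then
            PySem.Set.add ec (min a b, max a b)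
          else match PySem.Set.remove? ec (min a b, max a b) with | some s => s | none => ec)
      else ec) E_c) ?_
  exact pv_pairs_fold E (list1.take (list1.length / 3)) (list2.take (list2.length / 3)) E_c

lemma pv_canon_nil (E ec : List (Int × Int)) : pvCanon E [] ec = ec := by
  simp [pvCanon]

lemma pv_canon_snoc (E ps : List (Int × Int)) (p : Int × Int) (ec : List (Int × Int)) :
    pvGstep E (pvCanon E ps ec) p = pvCanon E (ps ++ [p]) ec := by
  unfold pvGstep pvCanon
  by_cases hEm : p ∈ E
  · have hE : E.contains p = true := by simpa using hEm
    rw [if_pos hE]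
    unfold PySem.Set.discard
    rw [List.filter_append, List.filter_filter]
    have hD' : (PySem.Set.ofList (ps ++ [p])).filter (fun e => !E.contains e)
        = (PySem.Set.ofList ps).filter (fun e => !E.contains e) := by
      rw [PySem.Set.ofList_append_singleton]
      by_cases hmem : p ∈ PySem.Set.ofList ps
      · rw [PySem.Set.add_of_mem hmem]
      · rw [PySem.Set.add_of_not_mem hmem, List.filter_append]
        simp [hEm]
    rw [hD']
    congr 1
    · apply List.filter_congr
      intro x hx
      by_cases hxp : x = p
      · subst hxp; simp [hEm]
      · have hcx : (ps ++ [p]).contains x = ps.contains x := by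
          apply pv_bool_ext
          simp [List.mem_append, hxp]
        rw [hcx]
        apply pv_bool_ext
        simp [hxp]
    · apply List.filter_eq_self.mpr
      intro a ha
      have haD : a ∈ (PySem.Set.ofList ps).filter (fun e => !E.contains e) :=
        List.mem_of_mem_filter ha
      have haE : ¬ a ∈ E := by
        have := List.of_mem_filter haD
        simpa using this
      have hap : a ≠ p := fun h => haE (h ▸ hEm)
      simp [hap]
  · have hE : E.contains p = false := by simpa using hEm
    rw [if_neg (by simp [hEm])]
    have hA : ec.filter (fun x => !((ps ++ [p]).contains x && E.contains x))
        = ec.filter (fun x => !(ps.contains x && E.contains x)) := by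
      apply List.filter_congr
      intro x hx
      by_cases hxp : x = p
      · subst hxp; simp [hEm]
      · have hcx : (ps ++ [p]).contains x = ps.contains x := by
          apply pv_bool_ext
          simp [List.mem_append, hxp]
        rw [hcx]
    rw [hA, PySem.Set.ofList_append_singleton]
    by_cases hmem : p ∈ PySem.Set.ofList ps
    · rw [PySem.Set.add_of_mem hmem]
      apply PySem.Set.add_of_mem
      by_cases hec : p ∈ ec
      · exact List.mem_append.mpr (Or.inl (List.mem_filter.mpr ⟨hec, by simp [hEm]⟩))
      · refine List.mem_append.mpr (Or.inr (List.mem_filter.mpr ⟨List.mem_filter.mpr ⟨hmem, by simp [hEm]⟩, by simp [hec]⟩))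
    · rw [PySem.Set.add_of_not_mem hmem, List.filter_append]
      have h1 : List.filter (fun e => !E.contains e) [p] = [p] := by simp [hEm]
      rw [h1, List.filter_append]
      by_cases hec : p ∈ ec
      · have h2 : List.filter (fun e => !ec.contains e) [p] = [] := by simp [hec]
        rw [h2, List.append_nil]
        apply PySem.Set.add_of_mem
        exact List.mem_append.mpr (Or.inl (List.mem_filter.mpr ⟨hec, by simp [hEm]⟩))
      · have h2 : List.filter (fun e => !ec.contains e) [p] = [p] := by simp [hec]
        rw [h2]
        have hnm : p ∉ ec.filter (fun x => !(ps.contains x && E.contains x)) ++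
            ((PySem.Set.ofList ps).filter (fun e => !E.contains e)).filter (fun e => !ec.contains e) := by
          intro hmemAB
          rcases List.mem_append.mp hmemAB with h | h
          · exact hec (List.mem_of_mem_filter h)
          · exact hmem (List.mem_of_mem_filter (List.mem_of_mem_filter h))
        rw [PySem.Set.add_of_not_mem hnm, List.append_assoc]

lemma pv_fold_canon (E : List (Int × Int)) (ps : List (Int × Int)) (ec : List (Int × Int)) :
    ps.foldl (pvGstep E) ec = pvCanon E ps ec := by
  induction ps using List.reverseRecOn with
  | nil => simp [pv_canon_nil]
  | append_singleton ps p ih =>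
      rw [List.foldl_append, List.foldl_cons, List.foldl_nil, ih, pv_canon_snoc]

-- ===== B-side lemmas: dedup / set-comprehension normalisation =====

-- s.update(xs) adds nothing when every element of xs is already in s
lemma pv_update_of_subset {α : Type} [BEq α] [LawfulBEq α] (s : PySem.Set α) (xs : List α)
    (h : ∀ x ∈ xs, x ∈ s) : PySem.Set.update s xs = s := by
  rw [PySem.Set.update_eq_append_filter]
  have hnil : (PySem.Set.ofList xs).filter (fun y => !(PySem.Set.contains s y)) = [] := by
    apply List.filter_eq_nil_iff.mpr
    intro a ha
    have : a ∈ s := h a ((PySem.Set.mem_ofList _ _).mp ha)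
    simp [PySem.Set.contains, this]
  rw [hnil, List.append_nil]

-- update only sees the ordered dedup of its argument
lemma pv_update_congr {α : Type} [BEq α] [LawfulBEq α] (s : PySem.Set α) (xs ys : List α)
    (h : PySem.Set.ofList xs = PySem.Set.ofList ys) :
    PySem.Set.update s xs = PySem.Set.update s ys := by
  rw [PySem.Set.update_eq_append_filter, PySem.Set.update_eq_append_filter, h]

-- set(filter) = filter(set): dedup and filter commute
lemma pv_ofList_filter {α : Type} [BEq α] [LawfulBEq α] (l : List α) (p : α → Bool) :
    PySem.Set.ofList (l.filter p) = (PySem.Set.ofList l).filter p := by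
  induction l using List.reverseRecOn with
  | nil => rfl
  | append_singleton l x ih =>
      rw [List.filter_append, PySem.Set.ofList_append_singleton]
      by_cases hp : p x
      · have h1 : List.filter p [x] = [x] := by simp [hp]
        rw [h1, PySem.Set.ofList_append_singleton, ih]
        by_cases hmem : x ∈ PySem.Set.ofList l
        · rw [PySem.Set.add_of_mem hmem]
          apply PySem.Set.add_of_mem
          exact List.mem_filter.mpr ⟨hmem, hp⟩
        · rw [PySem.Set.add_of_not_mem hmem, List.filter_append]
          have hx : x ∉ (PySem.Set.ofList l).filter p := fun hc => hmem (List.mem_of_mem_filter hc)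
          rw [PySem.Set.add_of_not_mem hx]
          simp [hp]
      · have h1 : List.filter p [x] = [] := by simp [hp]
        rw [h1, List.append_nil, ih]
        by_cases hmem : x ∈ PySem.Set.ofList l
        · rw [PySem.Set.add_of_mem hmem]
        · rw [PySem.Set.add_of_not_mem hmem, List.filter_append]
          simp [hp]

-- flatMapping over the dedup of l builds the same set as flatMapping over l
lemma pv_update_flatMap_dedup {α β : Type} [BEq α] [LawfulBEq α] [BEq β] [LawfulBEq β]
    (l : List α) (g : α → List β) (s : PySem.Set β) :
    PySem.Set.update s ((PySem.Set.ofList l).flatMap g) = PySem.Set.update s (l.flatMap g) := by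
  induction l using List.reverseRecOn generalizing s with
  | nil => rfl
  | append_singleton l x ih =>
      rw [PySem.Set.ofList_append_singleton]
      by_cases hmem : x ∈ PySem.Set.ofList l
      · rw [PySem.Set.add_of_mem hmem, List.flatMap_append, PySem.Set.update_append, ih]
        have hx : x ∈ l := (PySem.Set.mem_ofList _ _).mp hmem
        have hsub : ∀ y ∈ List.flatMap g [x], y ∈ PySem.Set.update s (l.flatMap g) := by
          intro y hy
          have hy' : y ∈ g x := by simpa using hy
          exact (PySem.Set.mem_update _ _ _).mpr (Or.inr (List.mem_flatMap.mpr ⟨x, hx, hy'⟩))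
        rw [pv_update_of_subset _ _ hsub]
      · rw [PySem.Set.add_of_not_mem hmem, List.flatMap_append, List.flatMap_append,
            PySem.Set.update_append, PySem.Set.update_append, ih]

lemma pv_ofList_flatMap_dedup {α β : Type} [BEq α] [LawfulBEq α] [BEq β] [LawfulBEq β]
    (l : List α) (g : α → List β) :
    PySem.Set.ofList ((PySem.Set.ofList l).flatMap g) = PySem.Set.ofList (l.flatMap g) := by
  rw [← PySem.Set.update_nil_left, ← PySem.Set.update_nil_left (l.flatMap g)]
  exact pv_update_flatMap_dedup l g []

-- blockwise: the set a flatMap builds only depends on the set each block builds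
lemma pv_update_flatMap_congr {α β : Type} [BEq β] [LawfulBEq β]
    (l : List α) (f f' : α → List β)
    (h : ∀ a ∈ l, PySem.Set.ofList (f a) = PySem.Set.ofList (f' a)) :
    ∀ s : PySem.Set β, PySem.Set.update s (l.flatMap f) = PySem.Set.update s (l.flatMap f') := by
  induction l with
  | nil => intro s; rfl
  | cons a t ih =>
      intro s
      rw [List.flatMap_cons, List.flatMap_cons, PySem.Set.update_append, PySem.Set.update_append,
          pv_update_congr s (f a) (f' a) (h a List.mem_cons_self)]
      exact ih (fun x hx => h x (List.mem_cons_of_mem _ hx)) _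

lemma pv_ofList_flatMap_congr {α β : Type} [BEq β] [LawfulBEq β]
    (l : List α) (f f' : α → List β)
    (h : ∀ a ∈ l, PySem.Set.ofList (f a) = PySem.Set.ofList (f' a)) :
    PySem.Set.ofList (l.flatMap f) = PySem.Set.ofList (l.flatMap f') := by
  rw [← PySem.Set.update_nil_left, ← PySem.Set.update_nil_left (l.flatMap f')]
  exact pv_update_flatMap_congr l f f' h []

-- mapping over the dedup of l builds the same set as mapping over l
lemma pv_ofList_map_dedup {α β : Type} [BEq α] [LawfulBEq α] [BEq β] [LawfulBEq β]
    (l : List α) (f : α → β) :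
    PySem.Set.ofList ((PySem.Set.ofList l).map f) = PySem.Set.ofList (l.map f) := by
  rw [List.map_eq_flatMap, List.map_eq_flatMap]
  exact pv_ofList_flatMap_dedup l (fun a => [f a])

-- membership in the raw candidate list, characterised by the endpoints
lemma pv_mem_pairs (list1 list2 : List Int) (x : Int × Int) :
    x ∈ pvPairs list1 list2 ↔
      (x.1 < x.2 ∧ ((x.1 ∈ list1.take (list1.length / 3) ∧ x.2 ∈ list2.take (list2.length / 3)) ∨
                    (x.2 ∈ list1.take (list1.length / 3) ∧ x.1 ∈ list2.take (list2.length / 3)))) := by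
  unfold pvPairs
  simp only [List.mem_flatMap, List.mem_map, List.mem_filter]
  constructor
  · rintro ⟨a, ha, b, ⟨hb, hab⟩, hx⟩
    have hab' : a ≠ b := by simpa using hab
    rcases le_or_gt a b with h | h
    · have hx' : x = (a, b) := by rw [← hx, min_eq_left h, max_eq_right h]
      subst hx'
      exact ⟨lt_of_le_of_ne h hab', Or.inl ⟨ha, hb⟩⟩
    · have hx' : x = (b, a) := by rw [← hx, min_eq_right h.le, max_eq_left h.le]
      subst hx'
      exact ⟨h, Or.inr ⟨ha, hb⟩⟩
  · rintro ⟨hlt, h | h⟩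
    · refine ⟨x.1, h.1, x.2, ⟨h.2, by simp [ne_of_lt hlt]⟩, ?_⟩
      rw [min_eq_left hlt.le, max_eq_right hlt.le]
    · refine ⟨x.2, h.1, x.1, ⟨h.2, by simp [(ne_of_lt hlt).symm]⟩, ?_⟩
      rw [min_eq_right hlt.le, max_eq_left hlt.le]

-- the addition comprehension over the deduplicated prefixes builds exactly set(pairs) - E
lemma pv_adds_eq (m1 m2 : List Int) (E : List (Int × Int)) :
    PySem.Set.ofList ((PySem.Set.ofList m1).flatMap (fun a =>
      ((PySem.Set.ofList m2).filter (fun b => decide (a ≠ b) && !(PySem.Set.contains E (min a b, max a b)))).map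
        (fun b => (min a b, max a b))))
    = (PySem.Set.ofList (m1.flatMap (fun a =>
        (m2.filter (fun b => a ≠ b)).map (fun b => (min a b, max a b))))).filter
        (fun e => !E.contains e) := by
  refine Eq.trans (pv_ofList_flatMap_congr (PySem.Set.ofList m1)
    (fun a => ((PySem.Set.ofList m2).filter (fun b => decide (a ≠ b) && !(PySem.Set.contains E (min a b, max a b)))).map
      (fun b => (min a b, max a b)))
    (fun a => (m2.filter (fun b => decide (a ≠ b) && !(PySem.Set.contains E (min a b, max a b)))).map
      (fun b => (min a b, max a b)))
    (fun a _ => by beta_reduce; rw [← pv_ofList_filter]; exact pv_ofList_map_dedup _ _)) ?_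
  refine Eq.trans (pv_ofList_flatMap_dedup _ _) ?_
  have hsplit : (fun (a : Int) =>
      (m2.filter (fun b => decide (a ≠ b) && !(PySem.Set.contains E (min a b, max a b)))).map
        (fun b => (min a b, max a b)))
      = fun a => ((m2.filter (fun b => a ≠ b)).map (fun b => (min a b, max a b))).filter
          (fun e => !E.contains e) := by
    funext a
    rw [List.filter_map, List.filter_filter]
    simp [PySem.Set.contains, Function.comp, Bool.and_comm]
  rw [hsplit, ← List.filter_flatMap, pv_ofList_filter]

lemma pv_B_eq_canon (list1 list2 : List Int) (E E_c : List (Int × Int)) :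
    random_edge_list_generate_alt list1 list2 E E_c
      = (E, pvCanon E (pvPairs list1 list2) E_c) := by
  have hf1 : PySem.Int.floordiv (list1.length : Int) 3 = ((list1.length / 3 : Nat) : Int) := by
    exact_mod_cast PySem.Int.floordiv_natCast list1.length 3
  have hf2 : PySem.Int.floordiv (list2.length : Int) 3 = ((list2.length / 3 : Nat) : Int) := by
    exact_mod_cast PySem.Int.floordiv_natCast list2.length 3
  simp only [random_edge_list_generate_alt, hf1, hf2, PySem.List.slice_to_natCast,
    PySem.List.dedup_eq_ofList, PySem.Set.ofList_ofList]
  set m1 := list1.take (list1.length / 3) with hm1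
  set m2 := list2.take (list2.length / 3) with hm2
  set ps := pvPairs list1 list2 with hps
  have hps' : ps = m1.flatMap (fun a => (m2.filter (fun b => a ≠ b)).map (fun b => (min a b, max a b))) := rfl
  refine congrArg (Prod.mk E) ?_
  -- the removal pass equals the filter in pvCanon
  have hrem : PySem.Set.diff E_c (PySem.Set.ofList (E_c.filter (fun e =>
      decide (e.1 < e.2) && PySem.Set.contains E e &&
      ((PySem.Set.contains (PySem.Set.ofList m1) e.1 && PySem.Set.contains (PySem.Set.ofList m2) e.2) ||
       (PySem.Set.contains (PySem.Set.ofList m2) e.1 && PySem.Set.contains (PySem.Set.ofList m1) e.2)))))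
      = E_c.filter (fun x => !(ps.contains x && E.contains x)) := by
    unfold PySem.Set.diff
    apply List.filter_congr
    intro x hx
    apply congrArg Bool.not
    apply pv_bool_ext
    rw [PySem.Set.contains_iff, PySem.Set.mem_ofList, List.mem_filter]
    simp only [Bool.and_eq_true, Bool.or_eq_true, decide_eq_true_eq, PySem.Set.contains_iff,
      PySem.Set.mem_ofList, List.contains_eq_mem, decide_eq_true_eq]
    rw [hps, pv_mem_pairs list1 list2 x]
    constructor
    · rintro ⟨_, ⟨⟨hlt, hE⟩, hsplit⟩⟩
      refine ⟨⟨hlt, ?_⟩, hE⟩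
      rcases hsplit with ⟨h1, h2⟩ | ⟨h1, h2⟩
      · exact Or.inl ⟨h1, h2⟩
      · exact Or.inr ⟨h2, h1⟩
    · rintro ⟨⟨hlt, hsplit⟩, hE⟩
      refine ⟨hx, ⟨⟨hlt, hE⟩, ?_⟩⟩
      rcases hsplit with ⟨h1, h2⟩ | ⟨h1, h2⟩
      · exact Or.inl ⟨h1, h2⟩
      · exact Or.inr ⟨h2, h1⟩
  rw [hrem]
  -- the addition pass equals the new-candidates list of pvCanon
  rw [pv_adds_eq m1 m2 E, ← hps']
  -- the in-place union appends exactly the fresh candidates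
  simp only [PySem.Set.union]
  rw [PySem.Set.update_eq_append_filter]
  have hnd : ((PySem.Set.ofList ps).filter (fun e => !E.contains e)).Nodup :=
    (PySem.Set.nodup_ofList ps).filter _
  rw [PySem.Set.ofList_eq_self_of_nodup _ hnd]
  unfold pvCanon
  congr 1
  apply List.filter_congr
  intro a ha
  have haE : ¬ a ∈ E := by
    have := List.of_mem_filter ha
    simpa using this
  apply congrArg Bool.not
  apply pv_bool_ext
  simp [List.mem_filter, haE]

-- ===== VERDICT (by name: the statement is the Claim_ definition above) =====
theorem random_edge_list_generate_spec : Claim_equal_random_edge_list_generate := by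
  intro list1 list2 E E_c _
  unfold Spec_random_edge_list_generate
  rw [pv_A_eq_fold, pv_B_eq_canon, pv_fold_canon]
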